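-- pv_equiv track=rewrite | github.com/i-am-not-kangjik/algorithm | 프로그래머스/0/120892. 암호 해독/암호 해독.py | solution
-- ===== SOURCE A (Python) =====
-- def solution(cipher, code):
--     answer = ''
--     for i in range(1, len(cipher)):
--         if (i % code == 0):
--             answer += cipher[i-1]
--     if (len(cipher) % code == 0):
--         answer += cipher[-1]
--     return answer
-- ===== SOURCE B (Python) =====
-- def solution(cipher, code):
--     return cipher[code-1::code]
-- ===== Notes on version B (the rewrite author's own statement) =====
-- stated objective: idiomatic
-- what changed: Replaces the scan over every position with a divisibility test and a separate last-character patch-up by a single stride slice cipher[code-1::code], done in C by the interpreter instead of a Python-level loop.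
-- outside the precondition, e.g. on solution('abcdef', -2): A returns 'bdf', B returns 'db'; on solution('ab', 0): A raises ZeroDivisionError, B raises ValueError; on solution('', 3): A raises IndexError, B returns ''
import Mathlib
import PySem

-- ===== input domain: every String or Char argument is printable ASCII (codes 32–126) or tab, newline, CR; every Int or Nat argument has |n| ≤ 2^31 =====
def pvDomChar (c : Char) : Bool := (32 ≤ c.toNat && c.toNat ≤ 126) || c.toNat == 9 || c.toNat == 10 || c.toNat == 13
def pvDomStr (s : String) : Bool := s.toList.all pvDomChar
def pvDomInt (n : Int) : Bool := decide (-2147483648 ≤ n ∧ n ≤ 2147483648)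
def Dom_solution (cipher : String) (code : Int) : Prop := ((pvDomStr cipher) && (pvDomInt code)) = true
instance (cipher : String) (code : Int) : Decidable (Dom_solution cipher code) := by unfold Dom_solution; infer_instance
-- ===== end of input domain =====

-- B replaces A's scan-all-positions-and-test loop (plus a separate last-character step) by a single stride slice cipher[code-1::code]; equal for all positive code and nonempty cipher.
-- ===== PORT A =====
def solution (cipher : String) (code : Int) : String :=
  let cs := cipher.toList
  -- answer = ''; for i in range(1, len(cipher)): if i % code == 0: answer += cipher[i-1]
  let answer : List Char :=
    (PySem.List.pyRange 1 (cs.length : Int) 1).foldl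
      (fun acc i => if PySem.Int.mod i code == 0 then acc ++ [PySem.List.pyGetD cs (i - 1) ' '] else acc) []
  -- if len(cipher) % code == 0: answer += cipher[-1]
  let answer :=
    if PySem.Int.mod (cs.length : Int) code == 0 then answer ++ [PySem.List.pyGetD cs (-1) ' '] else answer
  String.ofList answer

-- ===== PORT B =====
def solution_alt (cipher : String) (code : Int) : String :=
  -- return cipher[code-1::code]
  String.ofList ((PySem.List.slice? cipher.toList (some (code - 1)) none code).getD [])

-- ===== PRECONDITION & SPEC =====
-- Pre_ excludes: code == 0 (A raises ZeroDivisionError), the empty cipher (A raises IndexError on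
-- cipher[-1]), and negative code with |code| ≤ len(cipher), where nothing is specified and A's value
-- (acting like |code| via Python's divisor-sign modulo) and B's backwards slice are both defensible.
def Pre_solution (cipher : String) (code : Int) : Prop :=
  cipher ≠ "" ∧ (1 ≤ code ∨ code + (cipher.toList.length : Int) < 0)
instance (cipher : String) (code : Int) : Decidable (Pre_solution cipher code) := by unfold Pre_solution; infer_instance
def pvWitness_solution : String × Int := ("abcdef", 2)

def Spec_solution (cipher : String) (code : Int) (out : String) : Prop := out = solution_alt cipher code
instance (cipher : String) (code : Int) (out : String) : Decidable (Spec_solution cipher code out) := by unfold Spec_solution; infer_instance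

-- ===== CLAIM (what is proved, stated in full; the proofs are below) =====
def Claim_equal_solution : Prop := ∀ (cipher : String) (code : Int), Dom_solution cipher code → Pre_solution cipher code → Spec_solution cipher code (solution cipher code)

-- ===== LEMMAS AND PROOFS =====

-- filter of 1-range by divisibility = stride range
theorem filter_range_stride (c b : Int) (hc : 0 < c) :
    (PySem.List.pyRange 1 b 1).filter (fun i => PySem.Int.mod i c == 0)
      = PySem.List.pyRange c b c := by
  have h1 : ((PySem.List.pyRange 1 b 1).filter (fun i => PySem.Int.mod i c == 0)).Pairwise (· < ·) :=
    (PySem.List.pairwise_lt_pyRange_one 1 b).filter _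
  have h2 : (PySem.List.pyRange c b c).Pairwise (· < ·) := by
    rw [PySem.List.pyRange_of_pos c b hc]
    exact List.pairwise_lt_range.map _ (fun a b h => by
      have := mul_lt_mul_of_pos_left (Int.ofNat_lt.mpr h) hc
      omega)
  have hmem : ∀ x, x ∈ (PySem.List.pyRange 1 b 1).filter (fun i => PySem.Int.mod i c == 0)
      ↔ x ∈ PySem.List.pyRange c b c := by
    intro x
    rw [List.mem_filter, PySem.List.mem_pyRange_one, PySem.List.mem_pyRange_iff_of_pos hc]
    constructor
    · rintro ⟨⟨hx1, hxb⟩, hm⟩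
      have hd : c ∣ x := (PySem.Int.mod_eq_zero_iff_dvd x c).mp (by simpa using hm)
      exact ⟨Int.le_of_dvd (by omega) hd, hxb, (dvd_sub_right hd).mpr dvd_rfl⟩
    · rintro ⟨hcx, hxb, hd⟩
      have hd' : c ∣ x := by
        have := dvd_add hd (dvd_refl c); simpa using this
      exact ⟨⟨by omega, hxb⟩, by simpa using (PySem.Int.mod_eq_zero_iff_dvd x c).mpr hd'⟩
  exact List.Perm.eq_of_pairwise
    (fun a b _ _ hab hba => absurd hab (not_lt.mpr hba.le)) h1 h2
    ((List.perm_ext_iff_of_nodup (h1.imp ne_of_lt) (h2.imp ne_of_lt)).mpr hmem)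

-- B: the slice as a map over the stride range
theorem slice_eq_map_stride (cs : List Char) (c : Int) (hc : 1 ≤ c) :
    PySem.List.slice? cs (some (c - 1)) none c
      = some ((PySem.List.pyRange (c - 1) (cs.length : Int) c).map
          (fun i => PySem.List.pyGetD cs i ' ')) := by
  have hc0 : (0:Int) < c := hc
  have hcne : c ≠ 0 := by omega
  rcases (by omega : c - 1 ≤ (cs.length : Int) ∨ (cs.length : Int) < c - 1) with hle | hlt
  · simp only [PySem.List.slice?, PySem.List.sliceIndices, if_neg hcne,
      if_neg (by omega : ¬ c < 0), min_eq_left hle, if_neg (by omega : ¬ c - 1 < 0),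
      if_pos hc0]
    rw [PySem.List.pyRange_of_pos _ _ hc0, List.map_map]
    congr 1
    have h : ∀ k ∈ List.range (if c - 1 < (cs.length:Int) then
          (((cs.length:Int) - (c - 1) + c - 1) / c).toNat else 0),
        cs[(c - 1 + c * (k:Int)).toNat]?
          = some (((fun i => PySem.List.pyGetD cs i ' ') ∘ fun k : Nat => c - 1 + c * (k:Int)) k) := by
      intro k hk
      have hmem : (c - 1 + c * (k:Int)) ∈ PySem.List.pyRange (c - 1) (cs.length : Int) c := by
        rw [PySem.List.pyRange_of_pos _ _ hc0]
        exact List.mem_map.mpr ⟨k, hk, rfl⟩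
      have hb := (PySem.List.mem_pyRange_iff_of_pos hc0 _).mp hmem
      have h0 : 0 ≤ c - 1 + c * (k:Int) := by omega
      have h1 : c - 1 + c * (k:Int) < (cs.length : Int) := hb.2.1
      simp only [Function.comp]
      rw [PySem.List.pyGetD_eq_getElem cs ' ' h0 h1,
        List.getElem?_eq_getElem (by omega : (c - 1 + c * (k:Int)).toNat < cs.length)]
    rw [List.filterMap_congr h, List.filterMap_eq_map']
  · simp only [PySem.List.slice?, PySem.List.sliceIndices, if_neg hcne,
      if_neg (by omega : ¬ c < 0), min_eq_right (le_of_lt hlt), if_neg (by omega : ¬ c - 1 < 0)]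
    rw [PySem.List.pyRange_of_pos _ _ hc0]
    rw [if_neg (lt_irrefl (cs.length : Int)), if_neg (by omega : ¬ c - 1 < (cs.length : Int))]
    simp


theorem slice_far_neg_empty (cs : List Char) (c : Int) (h : c + (cs.length : Int) < 0) :
    PySem.List.slice? cs (some (c - 1)) none c = some [] := by
  have hc : c < 0 := by omega
  simp only [PySem.List.slice?, PySem.List.sliceIndices, if_neg (by omega : ¬ c = 0),
    if_pos hc, if_pos (by omega : c - 1 < 0),
    max_eq_right (by omega : c - 1 + (cs.length : Int) ≤ -1)]
  simp

theorem loop_far_neg_empty (cs : List Char) (c : Int) (hne : cs ≠ []) (h : c + (cs.length : Int) < 0) :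
    (if PySem.Int.mod (cs.length : Int) c == 0
      then ((PySem.List.pyRange 1 (cs.length : Int) 1).foldl
              (fun acc i => if PySem.Int.mod i c == 0
                then acc ++ [PySem.List.pyGetD cs (i - 1) ' '] else acc) [])
            ++ [PySem.List.pyGetD cs (-1) ' ']
      else ((PySem.List.pyRange 1 (cs.length : Int) 1).foldl
              (fun acc i => if PySem.Int.mod i c == 0
                then acc ++ [PySem.List.pyGetD cs (i - 1) ' '] else acc) []))
    = [] := by
  have hlen : 1 ≤ (cs.length : Int) := by
    have : cs.length ≠ 0 := fun h' => hne (List.eq_nil_of_length_eq_zero h')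
    omega
  have hnd : ∀ x : Int, 0 < x → x ≤ (cs.length : Int) → ¬ (PySem.Int.mod x c == 0) = true := by
    intro x hx hxle hm
    have hd : c ∣ x := (PySem.Int.mod_eq_zero_iff_dvd x c).mp (by simpa using hm)
    have : -c ≤ x := Int.le_of_dvd hx ((neg_dvd).mpr hd)
    omega
  rw [if_neg (hnd _ (by omega) (by omega)),
    PySem.List.foldl_append_if (fun i => PySem.Int.mod i c == 0)
      (fun i => PySem.List.pyGetD cs (i - 1) ' ') _ []]
  rw [List.filter_eq_nil_iff.mpr ?_]
  · simp
  · intro x hx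
    have := (PySem.List.mem_pyRange_one).mp hx
    exact hnd x (by omega) (by omega)

-- shift lemma
theorem map_stride_shift (cs : List Char) (c : Int) (hc : 0 < c) :
    (PySem.List.pyRange c ((cs.length : Int) + 1) c).map (fun i => PySem.List.pyGetD cs (i - 1) ' ')
      = (PySem.List.pyRange (c - 1) (cs.length : Int) c).map (fun i => PySem.List.pyGetD cs i ' ') := by
  rw [PySem.List.pyRange_of_pos _ _ hc, PySem.List.pyRange_of_pos _ _ hc,
    List.map_map, List.map_map]
  have hnum : (cs.length : Int) + 1 - c + c - 1 = (cs.length : Int) - (c - 1) + c - 1 := by ring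
  rw [hnum, if_congr (show (c < (cs.length : Int) + 1) ↔ (c - 1 < (cs.length : Int)) by omega)
    rfl rfl]
  apply List.map_congr_left
  intro k _
  simp only [Function.comp]
  have : c + c * (k:Int) - 1 = c - 1 + c * (k:Int) := by ring
  rw [this]

-- A's loop+patch as a map over the filtered range
theorem loop_eq_map_filter (cs : List Char) (c : Int) (hne : cs ≠ []) :
    (if PySem.Int.mod (cs.length : Int) c == 0
      then ((PySem.List.pyRange 1 (cs.length : Int) 1).foldl
              (fun acc i => if PySem.Int.mod i c == 0
                then acc ++ [PySem.List.pyGetD cs (i - 1) ' '] else acc) [])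
            ++ [PySem.List.pyGetD cs (-1) ' ']
      else ((PySem.List.pyRange 1 (cs.length : Int) 1).foldl
              (fun acc i => if PySem.Int.mod i c == 0
                then acc ++ [PySem.List.pyGetD cs (i - 1) ' '] else acc) []))
    = ((PySem.List.pyRange 1 ((cs.length : Int) + 1) 1).filter
        (fun i => PySem.Int.mod i c == 0)).map (fun i => PySem.List.pyGetD cs (i - 1) ' ') := by
  have hlen : 1 ≤ (cs.length : Int) := by
    have : cs.length ≠ 0 := fun h => hne (List.eq_nil_of_length_eq_zero h)
    omega
  rw [PySem.List.foldl_append_if (fun i => PySem.Int.mod i c == 0)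
    (fun i => PySem.List.pyGetD cs (i - 1) ' ') _ []]
  rw [PySem.List.pyRange_one_succ_right (by omega : (1:Int) ≤ (cs.length : Int)),
    List.filter_append, List.map_append, List.nil_append]
  have hget : PySem.List.pyGetD cs (-1) ' ' = PySem.List.pyGetD cs ((cs.length : Int) - 1) ' ' := by
    rw [PySem.List.pyGetD_neg_one cs ' ' hne,
      PySem.List.pyGetD_eq_getElem cs ' ' (by omega) (by omega)]
    rw [List.getLast_eq_getElem]
    congr 1
    omega
  by_cases h : PySem.Int.mod (cs.length : Int) c == 0
  · rw [if_pos h]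
    simp only [List.filter_cons, List.filter_nil, h, if_pos trivial]
    simp [hget]
  · rw [if_neg h]
    simp only [List.filter_cons, List.filter_nil]
    rw [if_neg (by simpa using h)]
    simp


-- ===== VERDICT (by name: the statement is the Claim_ definition above) =====
theorem solution_spec : Claim_equal_solution := by
  intro cipher code _ hpre
  obtain ⟨hne, hcase⟩ := hpre
  have hne' : cipher.toList ≠ [] := by simpa using hne
  unfold Spec_solution solution solution_alt
  dsimp only
  rcases hcase with hc | hfar
  · rw [slice_eq_map_stride cipher.toList code hc, Option.getD_some]
    rw [loop_eq_map_filter cipher.toList code hne',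
      filter_range_stride code ((cipher.toList.length : Int) + 1) hc,
      map_stride_shift cipher.toList code hc]
  · rw [slice_far_neg_empty cipher.toList code hfar, Option.getD_some,
      loop_far_neg_empty cipher.toList code hne' hfar]
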